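-- pv_equiv track=rewrite | github.com/ahmadianlab/tc-gan | nips_madness/loaders/run_configs.py | parse_gen_param_name
-- ===== SOURCE A (Python) =====
-- def parse_gen_param_name(name):
--     """
--     Convert ``'J'`` to ``('J', None)`` and ``'J_EI'`` to ``('J', (0, 1))``.
--
--     >>> parse_gen_param_name('J')
--     ('J', None)
--     >>> parse_gen_param_name('D_IE')
--     ('D', (1, 0))
--     >>> parse_gen_param_name('V_E')
--     ('V', (0,))
--     >>> parse_gen_param_name('A_xx')
--     Traceback (most recent call last):
--       ...
--     ValueError: Unsupported suffix in A_xx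
--
--     """
--     suffix_to_index = {'E': 0, 'I': 1}
--     if '_' in name:
--         array_name, suffix = name.split('_', 1)
--         if set(suffix) - set(suffix_to_index):
--             raise ValueError('Unsupported suffix in {}'.format(name))
--         index = tuple(suffix_to_index[i] for i in suffix)
--         return array_name, index
--     else:
--         return name, None
-- ===== SOURCE B (Python) =====
-- def parse_gen_param_name(name):
--     """Single left-to-right state machine over the characters: accumulate the
--     prefix until the first '_', then translate 'E'/'I' directly to 0/1.
--     No split, no dict, no separate validation pass."""
--     prefix = []
--     index = None
--     for ch in name:
--         if index is None:
--             if ch == '_':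
--                 index = []
--             else:
--                 prefix.append(ch)
--         elif ch == 'E':
--             index.append(0)
--         elif ch == 'I':
--             index.append(1)
--         else:
--             raise ValueError('Unsupported suffix in {}'.format(name))
--     if index is None:
--         return name, None
--     return ''.join(prefix), tuple(index)
-- ===== Notes on version B (the rewrite author's own statement) =====
-- stated objective: simpler
-- what changed: Replaces split('_',1) + set-difference validation + dict-lookup comprehension with one left-to-right state-machine pass over the characters that accumulates the prefix until the first '_' and then translates 'E'/'I' directly into 0/1, raising the same ValueError on any other suffix character.
import Mathlib
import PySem

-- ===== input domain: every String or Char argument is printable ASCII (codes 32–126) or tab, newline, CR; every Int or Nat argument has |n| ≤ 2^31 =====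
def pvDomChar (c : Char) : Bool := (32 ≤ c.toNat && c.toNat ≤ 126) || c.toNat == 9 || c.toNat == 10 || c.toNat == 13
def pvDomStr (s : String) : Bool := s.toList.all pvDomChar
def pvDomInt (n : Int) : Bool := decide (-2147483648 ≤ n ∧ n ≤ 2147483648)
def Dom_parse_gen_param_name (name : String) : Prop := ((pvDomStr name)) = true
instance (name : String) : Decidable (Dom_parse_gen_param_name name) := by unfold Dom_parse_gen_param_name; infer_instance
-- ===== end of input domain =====

-- B replaces A's split + set-difference validation + dict-lookup comprehension with one
-- left-to-right state-machine pass over the characters (objective: simpler; same behaviour on Pre_).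

-- ===== PORT A =====
def suffixToIndexA : PySem.Dict Char Int := PySem.Dict.ofList [('E', 0), ('I', 1)]

-- hand port of name.split('_', 1): the part after the FIRST '_' (exact: '_' is one char)
def splitSuffixA (cs : List Char) : List Char := (cs.dropWhile (fun c => c ≠ '_')).drop 1

def parse_gen_param_name (name : String) : String × Option (List Int) :=
  if name.toList.contains '_' then
    if PySem.Set.diff (PySem.Set.ofList (splitSuffixA name.toList)) suffixToIndexA.keys ≠ [] then
      ("", none)  -- ValueError('Unsupported suffix in …'): excluded by Pre_
    else
      (String.ofList (name.toList.takeWhile (fun c => c ≠ '_')),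
       some ((splitSuffixA name.toList).map (fun c => suffixToIndexA.getD c 0)))
  else
    (name, none)

-- ===== PORT B =====
-- loop state: none = ValueError was raised; some (prefix, none) = before the '_';
-- some (prefix, some index) = after the '_'
def stepB (st : Option (List Char × Option (List Int))) (ch : Char) :
    Option (List Char × Option (List Int)) :=
  match st with
  | none => none
  | some (pre, none) =>
    if ch = '_' then some (pre, some []) else some (pre ++ [ch], none)
  | some (pre, some ix) =>
    if ch = 'E' then some (pre, some (ix ++ [0]))
    else if ch = 'I' then some (pre, some (ix ++ [1]))
    else none

def parse_gen_param_name_alt (name : String) : String × Option (List Int) :=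
  match name.toList.foldl stepB (some ([], none)) with
  | some (_, none) => (name, none)
  | some (pre, some ix) => (String.ofList pre, some ix)
  | none => ("", none)  -- ValueError: excluded by Pre_

-- ===== PRECONDITION & SPEC =====
-- Pre_ excludes exactly the inputs where A raises ValueError: a name with '_' whose
-- suffix (everything after the first '_') contains a character other than 'E'/'I'.
def Pre_parse_gen_param_name (name : String) : Prop :=
  '_' ∈ name.toList → ∀ c ∈ (name.toList.dropWhile (fun c => c ≠ '_')).drop 1, c = 'E' ∨ c = 'I'
instance (name : String) : Decidable (Pre_parse_gen_param_name name) := by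
  unfold Pre_parse_gen_param_name; infer_instance

def pvWitness_parse_gen_param_name : String := "J"

def Spec_parse_gen_param_name (name : String) (out : String × Option (List Int)) : Prop := out = parse_gen_param_name_alt name
instance (name : String) (out : String × Option (List Int)) : Decidable (Spec_parse_gen_param_name name out) := by unfold Spec_parse_gen_param_name; infer_instance

-- ===== CLAIM (what is proved, stated in full; the proofs are below) =====
def Claim_equal_parse_gen_param_name : Prop := ∀ (name : String), Dom_parse_gen_param_name name → Pre_parse_gen_param_name name → Spec_parse_gen_param_name name (parse_gen_param_name name)

-- ===== LEMMAS AND PROOFS =====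

-- before the '_': the prefix pass just appends every character
theorem foldl_prefix (cs : List Char) :
    ∀ pre, '_' ∉ cs →
    cs.foldl stepB (some (pre, none)) = some (pre ++ cs, none) := by
  induction cs with
  | nil => intro pre _; simp
  | cons c rest ih =>
    intro pre h
    have hc : c ≠ '_' := fun e => h (e ▸ List.mem_cons_self ..)
    have hr : '_' ∉ rest := fun hm => h (List.mem_cons_of_mem _ hm)
    simp [stepB, hc, ih _ hr]

-- after the '_': each 'E'/'I' appends its index
theorem foldl_suffix (cs : List Char) :
    ∀ pre ix, (∀ c ∈ cs, c = 'E' ∨ c = 'I') →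
    cs.foldl stepB (some (pre, some ix)) =
      some (pre, some (ix ++ cs.map (fun c => if c = 'E' then (0 : Int) else 1))) := by
  induction cs with
  | nil => intro pre ix _; simp
  | cons c rest ih =>
    intro pre ix h
    have hrest : ∀ x ∈ rest, x = 'E' ∨ x = 'I' := fun x hx => h x (List.mem_cons_of_mem _ hx)
    rcases h c (List.mem_cons_self ..) with hc | hc <;> subst hc <;>
      simp [stepB, ih _ _ hrest]

theorem not_us_mem_takeWhile (cs : List Char) :
    '_' ∉ cs.takeWhile (fun c => c ≠ '_') := by
  intro h
  have := List.mem_takeWhile_imp h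
  simp at this

theorem dropWhile_cons_of_mem {cs : List Char} (h : '_' ∈ cs) :
    cs.dropWhile (fun c => c ≠ '_') = '_' :: splitSuffixA cs := by
  induction cs with
  | nil => simp at h
  | cons c rest ih =>
    by_cases hc : c = '_'
    · subst hc; simp [List.dropWhile, splitSuffixA]
    · have h' : '_' ∈ rest := by
        rcases List.mem_cons.mp h with h | h
        · exact absurd h.symm hc
        · exact h
      simpa [List.dropWhile, splitSuffixA, hc] using ih h'

theorem decomp_of_mem {cs : List Char} (h : '_' ∈ cs) :
    cs = cs.takeWhile (fun c => c ≠ '_') ++ '_' :: splitSuffixA cs := by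
  conv_lhs => rw [← List.takeWhile_append_dropWhile (p := fun c => c ≠ '_') (l := cs)]
  rw [dropWhile_cons_of_mem h]

theorem keys_A : suffixToIndexA.keys = ['E', 'I'] := by decide

-- on an all-{E,I} suffix the direct 0/1 translation equals A's dict lookups
theorem map_eq (cs : List Char) (h : ∀ c ∈ cs, c = 'E' ∨ c = 'I') :
    cs.map (fun c => if c = 'E' then (0 : Int) else 1) =
    cs.map (fun c => suffixToIndexA.getD c 0) := by
  apply List.map_congr_left
  intro c hc
  rcases h c hc with e | e <;> subst e <;> decide

-- ===== VERDICT (by name: the statement is the Claim_ definition above) =====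
theorem parse_gen_param_name_spec : Claim_equal_parse_gen_param_name := by
  intro name _ hpre
  unfold Spec_parse_gen_param_name parse_gen_param_name parse_gen_param_name_alt
  by_cases hm : '_' ∈ name.toList
  · have hall : ∀ c ∈ splitSuffixA name.toList, c = 'E' ∨ c = 'I' := hpre hm
    have hdiff : PySem.Set.diff (PySem.Set.ofList (splitSuffixA name.toList)) suffixToIndexA.keys = [] := by
      apply List.eq_nil_iff_forall_not_mem.mpr
      intro c hc
      have hc' : c ∈ PySem.Set.ofList (splitSuffixA name.toList) ∧ c ∉ suffixToIndexA.keys := by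
        simpa [PySem.Set.diff] using hc
      have hcm : c ∈ splitSuffixA name.toList := (PySem.Set.mem_ofList _ _).mp hc'.1
      rcases hall c hcm with h | h <;> subst h <;> rw [keys_A] at hc' <;> simp at hc'
    have hfold : name.toList.foldl stepB (some ([], none)) =
        some (name.toList.takeWhile (fun c => c ≠ '_'),
              some ((splitSuffixA name.toList).map (fun c => suffixToIndexA.getD c 0))) := by
      conv_lhs => rw [decomp_of_mem hm]
      rw [List.foldl_append, foldl_prefix _ _ (not_us_mem_takeWhile _)]
      show (('_' :: splitSuffixA name.toList).foldl stepB _) = _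
      rw [List.foldl_cons]
      show ((splitSuffixA name.toList).foldl stepB
        (some (name.toList.takeWhile (fun c => c ≠ '_'), some []))) = _
      rw [foldl_suffix _ _ _ hall, map_eq _ hall]
      simp
    rw [if_pos (by simpa using hm), if_neg (by simp [hdiff]), hfold]
  · rw [if_neg (by simpa using hm),
        foldl_prefix _ _ hm]
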